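-- pv_equiv track=rewrite | github.com/jlarata/Mastermind | Mastermind.py | analizaCoincidencias
-- ===== SOURCE A (Python) =====
-- def analizaCoincidencias(codigo, inputValidado, aciertos):
--     cantidadDeCoincidencias = 0
--     #la lista y los append sirven para que el jugador pueda ingresar "1111" y no le de 3 coincidencias
--     #alternativamente se puede impedir que el jugador ingrese ese tipo de inputs en la validación
--     #haciendo el juego más difícil.
--     coincidencias = []
--     for x in inputValidado:
--         if x in codigo and x not in coincidencias:
--             coincidencias.append(x)
--             cantidadDeCoincidencias += 1
--     return cantidadDeCoincidencias-aciertos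
-- ===== SOURCE B (Python) =====
-- def analizaCoincidencias(codigo, inputValidado, aciertos):
--     a = sorted(set(inputValidado))
--     b = sorted(set(codigo))
--     i = j = comunes = 0
--     while i < len(a) and j < len(b):
--         if a[i] < b[j]:
--             i += 1
--         elif b[j] < a[i]:
--             j += 1
--         else:
--             comunes += 1
--             i += 1
--             j += 1
--     return comunes - aciertos
-- ===== Notes on version B (the rewrite author's own statement) =====
-- stated objective: alternative
-- what changed: Instead of scanning inputValidado with an 'x in codigo' check and a manual dedup list, B deduplicates both lists, sorts them, and counts common elements with a two-pointer merge over the two sorted sequences.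
import Mathlib
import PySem

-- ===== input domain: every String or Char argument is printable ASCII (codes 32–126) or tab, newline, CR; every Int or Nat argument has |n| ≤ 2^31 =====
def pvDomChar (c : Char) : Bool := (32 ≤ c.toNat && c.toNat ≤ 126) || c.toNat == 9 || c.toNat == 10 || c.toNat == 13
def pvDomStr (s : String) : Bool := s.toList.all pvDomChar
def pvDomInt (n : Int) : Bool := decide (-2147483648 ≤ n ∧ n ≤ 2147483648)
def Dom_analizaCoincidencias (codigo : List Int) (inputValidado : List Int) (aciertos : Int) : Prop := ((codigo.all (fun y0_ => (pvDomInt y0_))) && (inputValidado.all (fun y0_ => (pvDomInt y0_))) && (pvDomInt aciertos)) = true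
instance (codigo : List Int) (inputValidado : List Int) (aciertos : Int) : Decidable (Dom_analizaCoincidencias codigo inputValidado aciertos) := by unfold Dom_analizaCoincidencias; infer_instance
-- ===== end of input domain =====

-- B replaces A's membership-scan loop with sort-then-two-pointer-merge over the deduplicated lists (alternative algorithm; return value only).


-- ===== PORT A =====
-- for x in inputValidado: if x in codigo and x not in coincidencias: append x; count += 1
def analizaCoincidencias (codigo : List Int) (inputValidado : List Int) (aciertos : Int) : Int :=
  (inputValidado.foldl
    (fun (st : Int × List Int) x =>
      if x ∈ codigo ∧ x ∉ st.2 then (st.1 + 1, st.2 ++ [x]) else st)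
    (0, [])).1 - aciertos

-- ===== PORT B =====
-- the two-pointer while loop over the two sorted sequences: advancing i (resp. j) = dropping the head
def mergeCommon : List Int → List Int → Int
  | [], _ => 0
  | _ :: _, [] => 0
  | a :: as, b :: bs =>
    if a < b then mergeCommon as (b :: bs)
    else if b < a then mergeCommon (a :: as) bs
    else 1 + mergeCommon as bs
termination_by as bs => as.length + bs.length

-- a = sorted(set(inputValidado)); b = sorted(set(codigo)); two-pointer merge count; return comunes - aciertos
def analizaCoincidencias_alt (codigo : List Int) (inputValidado : List Int) (aciertos : Int) : Int :=
  mergeCommon (PySem.List.sorted (PySem.Set.ofList inputValidado) (fun x => x) false)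
              (PySem.List.sorted (PySem.Set.ofList codigo) (fun x => x) false) - aciertos

-- ===== PRECONDITION & SPEC =====
def Spec_analizaCoincidencias (codigo : List Int) (inputValidado : List Int) (aciertos : Int) (out : Int) : Prop := out = analizaCoincidencias_alt codigo inputValidado aciertos
instance (codigo : List Int) (inputValidado : List Int) (aciertos : Int) (out : Int) : Decidable (Spec_analizaCoincidencias codigo inputValidado aciertos out) := by unfold Spec_analizaCoincidencias; infer_instance

-- ===== CLAIM (what is proved, stated in full; the proofs are below) =====
def Claim_equal_analizaCoincidencias : Prop := ∀ (codigo : List Int) (inputValidado : List Int) (aciertos : Int), Dom_analizaCoincidencias codigo inputValidado aciertos → Spec_analizaCoincidencias codigo inputValidado aciertos (analizaCoincidencias codigo inputValidado aciertos)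

-- ===== LEMMAS AND PROOFS =====

-- The coincidencias-only version of A's loop step.
def coStep (codigo : List Int) (co : List Int) (x : Int) : List Int :=
  if x ∈ codigo ∧ x ∉ co then co ++ [x] else co

lemma loop_fst (codigo : List Int) (xs : List Int) :
    ∀ (c : Int) (co : List Int),
      (xs.foldl (fun (st : Int × List Int) x =>
        if x ∈ codigo ∧ x ∉ st.2 then (st.1 + 1, st.2 ++ [x]) else st) (c, co)).1
      = c + ((xs.foldl (coStep codigo) co).length : Int) - (co.length : Int) := by
  induction xs with
  | nil => intro c co; simp
  | cons x xs ih =>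
      intro c co
      simp only [List.foldl_cons, coStep]
      by_cases h : x ∈ codigo ∧ x ∉ co
      · rw [if_pos h, if_pos h, ih (c + 1) (co ++ [x])]
        simp only [List.length_append, List.length_cons, List.length_nil]
        push_cast; ring
      · rw [if_neg h, if_neg h]
        exact ih c co

lemma coStep_eq_add (codigo : List Int) (co : List Int) (x : Int) :
    coStep codigo co x = if x ∈ codigo then PySem.Set.add co x else co := by
  unfold coStep
  by_cases hc : x ∈ codigo
  · by_cases hm : x ∈ co
    · simp [hc, hm, PySem.Set.add_of_mem]
    · simp [hc, hm, PySem.Set.add_of_not_mem]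
  · simp [hc]

lemma foldl_if_add_eq_filter (codigo : List Int) (xs : List Int) :
    ∀ (s : List Int),
      xs.foldl (fun s x => if x ∈ codigo then PySem.Set.add s x else s) s
      = (xs.filter (fun x => decide (x ∈ codigo))).foldl PySem.Set.add s := by
  induction xs with
  | nil => intro s; rfl
  | cons x xs ih =>
      intro s
      by_cases h : x ∈ codigo <;> simp [h, ih]

lemma loop_co_eq_ofList_filter (codigo : List Int) (xs : List Int) :
    xs.foldl (coStep codigo) [] = PySem.Set.ofList (xs.filter (fun x => decide (x ∈ codigo))) := by
  have h1 : coStep codigo = fun s x => if x ∈ codigo then PySem.Set.add s x else s := by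
    funext s x; exact coStep_eq_add codigo s x
  rw [h1, foldl_if_add_eq_filter]
  rw [PySem.Set.ofList_eq_foldl]

-- the merge loop on strictly increasing lists counts the members of as that lie in bs
lemma mergeCommon_eq_filter (as bs : List Int)
    (ha : as.Pairwise (· < ·)) (hb : bs.Pairwise (· < ·)) :
    mergeCommon as bs = ((as.filter (fun x => decide (x ∈ bs))).length : Int) := by
  fun_induction mergeCommon as bs with
  | case1 bs => simp
  | case2 a as => simp
  | case3 a as b bs hab ih =>
      rw [ih (List.Pairwise.of_cons ha) hb]
      have hnb : ¬(a = b ∨ a ∈ bs) := by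
        rintro (rfl | h)
        · omega
        · have := (List.pairwise_cons.mp hb).1 a h; omega
      simp [hnb]
  | case4 a as b bs hab hba ih =>
      rw [ih ha (List.Pairwise.of_cons hb)]
      have key : ∀ x ∈ a :: as, (x ∈ b :: bs) = (x ∈ bs) := by
        intro x hx
        have hax : a ≤ x := by
          rcases List.mem_cons.mp hx with h | h
          · omega
          · have := (List.pairwise_cons.mp ha).1 x h; omega
        simp only [List.mem_cons, eq_iff_iff]
        constructor
        · rintro (rfl | h)
          · omega
          · exact h
        · exact Or.inr
      have : (a :: as).filter (fun x => decide (x ∈ b :: bs))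
           = (a :: as).filter (fun x => decide (x ∈ bs)) := by
        apply List.filter_congr
        intro x hx
        simp [key x hx]
      rw [this]
  | case5 a as b bs hab hba ih =>
      have heq : a = b := by omega
      subst heq
      rw [ih (List.Pairwise.of_cons ha) (List.Pairwise.of_cons hb)]
      have hfe : as.filter (fun x => decide (x = a ∨ x ∈ bs))
           = as.filter (fun x => decide (x ∈ bs)) := by
        apply List.filter_congr
        intro x hx
        have hlt := (List.pairwise_cons.mp ha).1 x hx
        simp only [decide_eq_decide]
        constructor
        · rintro (rfl | h)
          · omega
          · exact h
        · exact Or.inr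
      simp only [List.filter_cons, List.mem_cons, true_or, decide_true, if_true]
      rw [hfe, List.length_cons]
      push_cast
      ring

-- two nodup lists with the same members have the same filter length
lemma length_filter_perm {p : Int → Bool} {xs ys : List Int} (h : xs.Perm ys) :
    (xs.filter p).length = (ys.filter p).length :=
  (h.filter p).length_eq

-- ===== VERDICT (by name: the statement is the Claim_ definition above) =====
theorem analizaCoincidencias_spec : Claim_equal_analizaCoincidencias := by
  intro codigo inputValidado aciertos _
  unfold Spec_analizaCoincidencias analizaCoincidencias analizaCoincidencias_alt
  rw [loop_fst codigo inputValidado 0 []]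
  rw [loop_co_eq_ofList_filter codigo inputValidado]
  rw [mergeCommon_eq_filter _ _
        (PySem.List.sorted_ofList_pairwise_lt inputValidado)
        (PySem.List.sorted_ofList_pairwise_lt codigo)]
  have hperm : (PySem.List.sorted (PySem.Set.ofList inputValidado) (fun x => x) false).Perm
      (PySem.Set.ofList inputValidado) := PySem.List.sorted_perm _ _ _
  have hmemb : ∀ x, (x ∈ PySem.List.sorted (PySem.Set.ofList codigo) (fun x => x) false) ↔ x ∈ codigo := by
    intro x
    rw [PySem.List.mem_sorted, PySem.Set.mem_ofList]
  -- same predicate on both sides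
  have hfc : (PySem.List.sorted (PySem.Set.ofList inputValidado) (fun x => x) false).filter
        (fun x => decide (x ∈ PySem.List.sorted (PySem.Set.ofList codigo) (fun x => x) false))
      = (PySem.List.sorted (PySem.Set.ofList inputValidado) (fun x => x) false).filter
        (fun x => decide (x ∈ codigo)) := by
    apply List.filter_congr
    intro x _
    simp [hmemb x]
  rw [hfc]
  rw [length_filter_perm hperm]
  -- (ofList xs).filter (∈ codigo)  vs  ofList (xs.filter (∈ codigo)) : perm of nodup lists
  have hp : ((PySem.Set.ofList inputValidado).filter (fun x => decide (x ∈ codigo))).Perm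
      (PySem.Set.ofList (inputValidado.filter (fun x => decide (x ∈ codigo)))) := by
    rw [List.perm_ext_iff_of_nodup]
    · intro a
      simp [List.mem_filter, PySem.Set.mem_ofList]
    · exact (PySem.Set.nodup_ofList _).filter _
    · exact PySem.Set.nodup_ofList _
  rw [hp.length_eq]
  simp
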